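-- pv_equiv track=rewrite | github.com/rendyuwu/noa | apps/api/src/noa_api/core/agent/change_validation.py | _reason_provenance_tokens
-- ===== SOURCE A (Python) =====
-- import unicodedata
--
-- def _normalized_text(value: object) -> str | None:
--     if not isinstance(value, str):
--         return None
--     normalized = value.strip()
--     return normalized or None
--
-- def _reason_provenance_tokens(value: object) -> list[str]:
--     normalized = _normalized_text(value)
--     if normalized is None:
--         return []
--     folded = unicodedata.normalize("NFKC", normalized).casefold()
--     tokens: list[str] = []
--     current: list[str] = []
--
--     for char in folded:
--         if char.isalnum():
--             current.append(char)
--             continue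
--         if char == "-" and current:
--             current.append(char)
--             continue
--         if current:
--             token = "".join(current).strip("-")
--             if token:
--                 tokens.append(token)
--             current = []
--
--     if current:
--         token = "".join(current).strip("-")
--         if token:
--             tokens.append(token)
--
--     return tokens
-- ===== SOURCE B (Python) =====
-- import unicodedata
--
-- def _reason_provenance_tokens(value):
--     if not isinstance(value, str):
--         return []
--     normalized = value.strip()
--     if not normalized:
--         return []
--     folded = unicodedata.normalize("NFKC", normalized).casefold()
--     cleaned = "".join(c if (c.isalnum() or c == "-") else " " for c in folded)
--     out = []
--     for run in cleaned.split():
--         token = run.strip("-")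
--         if token:
--             out.append(token)
--     return out
-- ===== Notes on version B (the rewrite author's own statement) =====
-- stated objective: simpler
-- what changed: Replaces A's hand-rolled per-character state machine (tokens/current lists with three branch cases and a trailing flush) by a clean-then-split pipeline: map every character that is neither alphanumeric nor a hyphen to a space, whitespace-split the result, and strip leading/trailing hyphens from each run.
import Mathlib
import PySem

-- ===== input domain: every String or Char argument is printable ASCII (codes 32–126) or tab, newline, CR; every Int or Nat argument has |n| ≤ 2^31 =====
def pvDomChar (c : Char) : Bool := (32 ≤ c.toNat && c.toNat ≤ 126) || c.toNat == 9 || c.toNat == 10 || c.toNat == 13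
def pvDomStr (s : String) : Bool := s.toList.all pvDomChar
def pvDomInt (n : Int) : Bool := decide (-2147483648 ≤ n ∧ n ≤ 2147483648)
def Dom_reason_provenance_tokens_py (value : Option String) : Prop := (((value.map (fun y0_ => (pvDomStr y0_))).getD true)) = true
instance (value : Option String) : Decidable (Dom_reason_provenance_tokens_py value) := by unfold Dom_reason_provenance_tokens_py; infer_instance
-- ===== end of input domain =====

-- B replaces A's hand-rolled character state machine by clean-then-split: map non-token
-- characters to spaces, split on whitespace, strip hyphens from each run (objective: simpler).
-- NFKC is ported as the identity and casefold as lower — both exact on the ASCII domain Dom.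

-- B replaces A's hand-rolled character state machine by clean-then-split: map non-token
-- characters to spaces, split on whitespace, strip hyphens from each run (objective: simpler).
-- NFKC is ported as the identity and casefold as lower; both ports are exact on the ASCII domain Dom.

-- ===== PORT A =====
-- helper: token = "".join(current).strip("-"); if token: tokens.append(token)
def pvFlushA (tokens : List String) (current : List Char) : List String :=
  let token := PySem.Chars.stripChars current ['-']
  if token ≠ [] then tokens ++ [String.ofList token] else tokens

-- the for-loop of A, state (tokens, current)
def pvLoopA : List Char → List String → List Char → List String
  | [], tokens, current => if current ≠ [] then pvFlushA tokens current else tokens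
  | c :: rest, tokens, current =>
      if PySem.Chars.isalnum c then pvLoopA rest tokens (current ++ [c])
      else if c = '-' ∧ current ≠ [] then pvLoopA rest tokens (current ++ [c])
      else if current ≠ [] then pvLoopA rest (pvFlushA tokens current) []
      else pvLoopA rest tokens current

def reason_provenance_tokens_py (value : Option String) : List String :=
  match value with
  | none => []                                   -- not a str
  | some s =>
      let normalized := PySem.Chars.strip s.toList
      if normalized = [] then []                 -- 'normalized or None' guard
      else
        let folded := PySem.Chars.lower normalized   -- NFKC (identity on ASCII) + casefold (= lower on ASCII)
        pvLoopA folded [] []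

-- ===== PORT B =====
def reason_provenance_tokens_py_alt (value : Option String) : List String :=
  match value with
  | none => []
  | some s =>
      let normalized := PySem.Chars.strip s.toList
      if normalized = [] then []
      else
        let folded := PySem.Chars.lower normalized   -- NFKC (identity on ASCII) + casefold (= lower on ASCII)
        let cleaned := folded.map (fun c => if PySem.Chars.isalnum c || c = '-' then c else ' ')
        (PySem.Chars.split₀ cleaned).foldl
          (fun out run =>
            let token := PySem.Chars.stripChars run ['-']
            if token ≠ [] then out ++ [String.ofList token] else out) []

-- ===== PRECONDITION & SPEC =====
def Spec_reason_provenance_tokens_py (value : Option String) (out : List String) : Prop := out = reason_provenance_tokens_py_alt value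
instance (value : Option String) (out : List String) : Decidable (Spec_reason_provenance_tokens_py value out) := by unfold Spec_reason_provenance_tokens_py; infer_instance

-- ===== CLAIM (what is proved, stated in full; the proofs are below) =====
def Claim_equal_reason_provenance_tokens_py : Prop := ∀ (value : Option String), Dom_reason_provenance_tokens_py value → Spec_reason_provenance_tokens_py value (reason_provenance_tokens_py value)

-- ===== LEMMAS AND PROOFS =====
-- B's fold step, named for the proofs (definitionally the lambda in B's port)
def pvStepB (out : List String) (run : List Char) : List String :=
  let token := PySem.Chars.stripChars run ['-']
  if token ≠ [] then out ++ [String.ofList token] else out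

-- the token predicate: alnum or hyphen
def pvTk (c : Char) : Bool := PySem.Chars.isalnum c || c = '-'

theorem pvAlnum_ne_hyphen {c : Char} (h : PySem.Chars.isalnum c = true) : (decide (c = '-')) = false := by
  by_contra hne
  have hc : c = '-' := by simpa using hne
  subst hc
  simp [PySem.Chars.isalnum, PySem.Chars.isalpha, PySem.Chars.isdigit,
    PySem.Chars.isupper, PySem.Chars.islower] at h

theorem pvDropWhile_app (r : List Char) {c : Char} (h : (decide (c = '-')) = false) :
    (r ++ [c]).dropWhile (fun c => decide (c = '-')) = r.dropWhile (fun c => decide (c = '-')) ++ [c] := by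
  rw [List.dropWhile_append]
  split
  · next he =>
      simp only [List.isEmpty_iff] at he
      rw [he]; simp [List.dropWhile, h]
  · rfl

theorem pvDropWhile_app_ne (r : List Char) (c : Char)
    (h : r.dropWhile (fun c => decide (c = '-')) ≠ []) :
    (r ++ [c]).dropWhile (fun c => decide (c = '-')) = r.dropWhile (fun c => decide (c = '-')) ++ [c] := by
  rw [List.dropWhile_append]
  split
  · next he => simp only [List.isEmpty_iff] at he; exact absurd he h
  · rfl

theorem pvTk_not_space {c : Char} (h : pvTk c = true) : PySem.Chars.isspace c = false := by
  have hle : ∀ a b : Char, (a ≤ b) ↔ a.toNat ≤ b.toNat := fun a b => Iff.rfl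
  simp only [pvTk, PySem.Chars.isalnum, PySem.Chars.isalpha, PySem.Chars.isdigit,
    PySem.Chars.isupper, PySem.Chars.islower, Bool.or_eq_true, Bool.and_eq_true,
    decide_eq_true_eq, hle] at h
  have h45 : c = '-' → c.toNat = 45 := fun e => by subst e; rfl
  simp only [PySem.Chars.isspace, Bool.or_eq_false_iff, Bool.and_eq_false_iff,
    decide_eq_false_iff_not]
  rcases h with ((⟨h1,h2⟩|⟨h1,h2⟩)|⟨h1,h2⟩)|h1
  · simp [show ('A':Char).toNat = 65 from rfl, show ('Z':Char).toNat = 90 from rfl] at h1 h2; omega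
  · simp [show ('a':Char).toNat = 97 from rfl, show ('z':Char).toNat = 122 from rfl] at h1 h2; omega
  · simp [show ('0':Char).toNat = 48 from rfl, show ('9':Char).toNat = 57 from rfl] at h1 h2; omega
  · have := h45 h1; omega

theorem pvStrip_dropWhile (r : List Char) :
    PySem.Chars.stripChars (r.dropWhile (fun c => decide (c = '-'))) ['-'] =
      PySem.Chars.stripChars r ['-'] := by
  simp only [PySem.Chars.stripChars]
  have hp : (fun c => (['-'] : List Char).contains c) = (fun c => decide (c = '-')) := by
    funext c; simp
  rw [hp, List.dropWhile_idempotent]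

theorem pvStrip_all_hyphen {r : List Char} (h : r.dropWhile (fun c => decide (c = '-')) = []) :
    PySem.Chars.stripChars r ['-'] = [] := by
  simp only [PySem.Chars.stripChars]
  have hp : (fun c => (['-'] : List Char).contains c) = (fun c => decide (c = '-')) := by
    funext c; simp
  rw [hp, h]; simp

theorem pvGo_acc (xs : List Char) : ∀ (cur : List Char) (acc : List (List Char)),
    PySem.Chars.split₀.go xs cur acc = acc.reverse ++ PySem.Chars.split₀.go xs cur [] := by
  induction xs with
  | nil => intro cur acc; rw [PySem.Chars.split₀.go, PySem.Chars.split₀.go]; split <;> simp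
  | cons c rest ih =>
      intro cur acc
      rw [PySem.Chars.split₀.go]; conv_rhs => rw [PySem.Chars.split₀.go]
      split
      · split
        · exact ih [] acc
        · rw [ih [] (cur.reverse :: acc), ih [] [cur.reverse]]; simp
      · exact ih (c :: cur) acc

theorem pvFlush_eq_step (ts : List String) (r : List Char) :
    pvFlushA ts (r.dropWhile (fun c => decide (c = '-'))) = pvStepB ts r := by
  simp only [pvFlushA, pvStepB, pvStrip_dropWhile]

theorem pvStep_trivial (ts : List String) {r : List Char}
    (h : r.dropWhile (fun c => decide (c = '-')) = []) : pvStepB ts r = ts := by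
  simp [pvStepB, pvStrip_all_hyphen h]

theorem pvMain (cs : List Char) : ∀ (r : List Char) (ts : List String),
    pvLoopA cs ts (r.dropWhile (fun c => decide (c = '-'))) =
      (PySem.Chars.split₀.go (cs.map (fun c => if pvTk c then c else ' ')) r.reverse []).foldl pvStepB ts := by
  induction cs with
  | nil =>
      intro r ts
      simp only [List.map_nil]
      rw [pvLoopA, PySem.Chars.split₀.go]
      by_cases hd : r.dropWhile (fun c => decide (c = '-')) = []
      · rw [if_neg (show ¬(List.dropWhile (fun c => decide (c = '-')) r ≠ []) by simp [hd])]
        by_cases hr : r = []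
        · subst hr; simp
        · rw [if_neg (show ¬(r.reverse.isEmpty = true) by simp [hr])]
          simp only [List.reverse_reverse, List.reverse_singleton, List.foldl_cons, List.foldl_nil]
          rw [pvStep_trivial ts hd]
      · have hr : r ≠ [] := by intro h; subst h; simp at hd
        rw [if_pos hd, if_neg (show ¬(r.reverse.isEmpty = true) by simp [hr])]
        simp only [List.reverse_reverse, List.reverse_singleton, List.foldl_cons, List.foldl_nil]
        rw [pvFlush_eq_step]
  | cons c rest ih =>
      intro r ts
      rw [List.map_cons, pvLoopA]
      by_cases htk : pvTk c = true
      · have hs : PySem.Chars.isspace c = false := pvTk_not_space htk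
        rw [if_pos htk, PySem.Chars.split₀.go, hs]
        simp only [Bool.false_eq_true, if_false]
        by_cases ha : PySem.Chars.isalnum c = true
        · rw [if_pos ha]
          have hih := ih (r ++ [c]) ts
          rw [pvDropWhile_app r (pvAlnum_ne_hyphen ha)] at hih
          rw [hih]; simp
        · rw [if_neg (show ¬(PySem.Chars.isalnum c = true) by simp [ha])]
          have hc : c = '-' := by simp [pvTk, ha] at htk; exact htk
          by_cases hd : r.dropWhile (fun c => decide (c = '-')) = []
          · rw [if_neg (show ¬(c = '-' ∧ List.dropWhile (fun c => decide (c = '-')) r ≠ []) from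
                  fun h => h.2 hd),
                if_neg (show ¬(List.dropWhile (fun c => decide (c = '-')) r ≠ []) by simp [hd])]
            have hih := ih (r ++ [c]) ts
            have hdrop : (r ++ [c]).dropWhile (fun c => decide (c = '-')) = [] := by
              rw [List.dropWhile_append]
              simp [hd, List.dropWhile, hc]
            rw [hdrop] at hih
            rw [hd, hih]; simp
          · rw [if_pos ⟨hc, hd⟩]
            have hih := ih (r ++ [c]) ts
            rw [pvDropWhile_app_ne r c hd] at hih
            rw [hih]; simp
      · have hcc : (if pvTk c = true then c else ' ') = ' ' := if_neg htk
        have ha : PySem.Chars.isalnum c = false := by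
          cases h : PySem.Chars.isalnum c
          · rfl
          · exact absurd (show pvTk c = true by simp [pvTk, h]) htk
        have hc : ¬ (c = '-') := by
          intro h; exact htk (by simp [pvTk, h])
        rw [if_neg (show ¬(PySem.Chars.isalnum c = true) by simp [ha]),
            if_neg (show ¬(c = '-' ∧ List.dropWhile (fun c => decide (c = '-')) r ≠ []) from
              fun h => hc h.1),
            hcc, PySem.Chars.split₀.go,
            if_pos (show PySem.Chars.isspace ' ' = true by decide)]
        by_cases hd : r.dropWhile (fun c => decide (c = '-')) = []
        · rw [if_neg (show ¬(List.dropWhile (fun c => decide (c = '-')) r ≠ []) by simp [hd])]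
          by_cases hr : r = []
          · subst hr
            rw [if_pos (show (List.reverse ([] : List Char)).isEmpty = true by decide)]
            have hih := ih [] ts
            simpa using hih
          · rw [if_neg (show ¬(r.reverse.isEmpty = true) by simp [hr])]
            rw [pvGo_acc _ [] [r.reverse.reverse]]
            simp only [List.reverse_reverse, List.reverse_cons, List.reverse_nil, List.nil_append,
              List.foldl_append, List.foldl]
            rw [pvStep_trivial ts hd, hd]
            have hih := ih [] ts
            simpa using hih
        · have hr : r ≠ [] := by intro h; subst h; simp at hd
          rw [if_pos hd, if_neg (show ¬(r.reverse.isEmpty = true) by simp [hr])]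
          rw [pvGo_acc _ [] [r.reverse.reverse]]
          simp only [List.reverse_reverse, List.reverse_cons, List.reverse_nil, List.nil_append,
            List.foldl_append, List.foldl]
          rw [pvFlush_eq_step]
          have hih := ih [] (pvStepB ts r)
          simpa using hih

-- ===== VERDICT (by name: the statement is the Claim_ definition above) =====
theorem reason_provenance_tokens_py_spec : Claim_equal_reason_provenance_tokens_py := by
  intro value _
  unfold Spec_reason_provenance_tokens_py
  match value with
  | none => rfl
  | some s =>
      show reason_provenance_tokens_py (some s) = reason_provenance_tokens_py_alt (some s)
      unfold reason_provenance_tokens_py reason_provenance_tokens_py_alt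
      by_cases h : PySem.Chars.strip s.toList = []
      · simp [h]
      · simp only [if_neg h]
        show pvLoopA (PySem.Chars.lower (PySem.Chars.strip s.toList)) [] [] =
          List.foldl pvStepB []
            (PySem.Chars.split₀ ((PySem.Chars.lower (PySem.Chars.strip s.toList)).map
              (fun c => if PySem.Chars.isalnum c || c = '-' then c else ' ')))
        have hmain := pvMain (PySem.Chars.lower (PySem.Chars.strip s.toList)) [] []
        simpa [PySem.Chars.split₀, pvTk] using hmain
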